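-- pv_equiv track=rewrite | github.com/hero-rq/Yoki | easy_merge.py | mirror_merge
-- ===== SOURCE A (Python) =====
-- def mirror_merge(nums):
--     """
--     Apply the Mirror Merge rules until no merges are possible.
--     Return the final list of integers.
--     """
--     i = 0
--     while i < len(nums) - 1:
--         if nums[i] == nums[i+1]:
--             nums[i] += 1
--             nums.pop(i + 1)
--             i = 0
--         else:
--             i += 1
--
--     return nums
-- ===== SOURCE B (Python) =====
-- def mirror_merge(nums):
--     """
--     Apply the Mirror Merge rules until no merges are possible.
--     Return the final list of integers.
--     """
--     stack = []
--     for num in nums: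
--         while stack and stack[-1] == num:
--             stack.pop()
--             num += 1
--         stack.append(num)
--     return stack
-- ===== Notes on version B (the rewrite author's own statement) =====
-- stated objective: faster
-- what changed: Replaced the restart-from-0 rescan loop with a single left-to-right pass over a stack that cascades merges on push, turning quadratic/cubic rescanning into one linear pass.
import Mathlib
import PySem

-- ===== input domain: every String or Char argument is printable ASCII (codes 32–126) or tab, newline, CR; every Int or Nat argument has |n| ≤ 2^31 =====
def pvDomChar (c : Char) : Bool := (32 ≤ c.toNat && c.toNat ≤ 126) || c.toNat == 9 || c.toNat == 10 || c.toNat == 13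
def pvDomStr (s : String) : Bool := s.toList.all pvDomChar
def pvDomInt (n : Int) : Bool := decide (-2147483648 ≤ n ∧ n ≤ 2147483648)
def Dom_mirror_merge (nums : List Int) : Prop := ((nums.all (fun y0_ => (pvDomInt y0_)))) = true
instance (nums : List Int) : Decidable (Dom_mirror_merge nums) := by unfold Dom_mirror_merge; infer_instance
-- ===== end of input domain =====

-- B replaces A's restart-and-rescan loop by one linear stack pass (faster, asymptotic).
-- A mutates its argument in place (pop/assign); the equivalence proved here is about the RETURN value only.

-- ===== PORT A =====
-- A's while loop: i scans; when nums[i] == nums[i+1] it increments nums[i], pops index i+1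
-- (set + eraseIdx) and restarts at i = 0; otherwise i += 1. Terminates since each step either
-- shortens the list or moves i right.
def mirror_merge_go (nums : List Int) (i : Nat) : List Int :=
  if _h : i + 1 < nums.length then
    if nums.getD i 0 = nums.getD (i + 1) 0 then
      mirror_merge_go ((nums.set i (nums.getD i 0 + 1)).eraseIdx (i + 1)) 0
    else
      mirror_merge_go nums (i + 1)
  else nums
termination_by (nums.length, nums.length - i)
decreasing_by
  · left
    simp [List.length_eraseIdx, *]
    omega
  · right
    omega

def mirror_merge (nums : List Int) : List Int := mirror_merge_go nums 0

-- ===== PORT B =====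
-- B's inner while loop: pop while the top of the stack equals num, incrementing num; then push.
def mm_push (stack : List Int) (num : Int) : List Int :=
  match stack with
  | [] => [num]
  | t :: rest => if t = num then mm_push rest (num + 1) else num :: t :: rest

-- Stack kept top-first (Python appends at the end), so the result is reversed at the end.
def mirror_merge_alt (nums : List Int) : List Int :=
  (nums.foldl mm_push []).reverse

-- ===== PRECONDITION & SPEC =====
def Spec_mirror_merge (nums : List Int) (out : List Int) : Prop := out = mirror_merge_alt nums
instance (nums : List Int) (out : List Int) : Decidable (Spec_mirror_merge nums out) := by unfold Spec_mirror_merge; infer_instance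

-- ===== CLAIM (what is proved, stated in full; the proofs are below) =====
def Claim_equal_mirror_merge : Prop := ∀ (nums : List Int), Dom_mirror_merge nums → Spec_mirror_merge nums (mirror_merge nums)

-- ===== LEMMAS AND PROOFS =====

-- If the stack (bottom-to-top, i.e. s.reverse) followed by the remaining input has no adjacent
-- equal elements, every push is a plain push: the fold just reverses l onto s.
theorem mm_push_fold_noadj : ∀ (l s : List Int), List.IsChain (· ≠ ·) (s.reverse ++ l) →
    l.foldl mm_push s = l.reverse ++ s := by
  intro l
  induction l with
  | nil => intro s _; simp
  | cons a l ih =>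
    intro s hch
    have hpush : mm_push s a = a :: s := by
      cases s with
      | nil => simp [mm_push]
      | cons t rest =>
        have hne : t ≠ a := by
          have h2 := (List.isChain_append.mp hch).2.2
          simpa using h2
        simp [mm_push, hne]
    have : List.IsChain (· ≠ ·) ((a :: s).reverse ++ l) := by
      simpa [List.append_assoc] using hch
    simp [List.foldl_cons, hpush, ih (a :: s) this, List.append_assoc]

theorem mm_push_nil (n : Int) : mm_push [] n = [n] := rfl

theorem mm_push_cons_ne (t : Int) (rest : List Int) (n : Int) (h : t ≠ n) :
    mm_push (t :: rest) n = n :: t :: rest := by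
  simp [mm_push, h]

theorem mm_push_cons_eq (t : Int) (rest : List Int) (n : Int) (h : t = n) :
    mm_push (t :: rest) n = mm_push rest (n + 1) := by
  simp [mm_push, h]

theorem isChain_take_one (xs : List Int) : List.IsChain (· ≠ ·) (xs.take 1) := by
  cases xs <;> simp

-- Pushing l[i] onto the reversed already-scanned prefix is a plain push, because the scanned
-- prefix l.take (i+1) has no adjacent equal pair.
theorem mm_push_reverse_take (l : List Int) (i : Nat) (h : i < l.length)
    (hch : List.IsChain (· ≠ ·) (l.take (i + 1))) :
    mm_push ((l.take i).reverse) (l[i]) = l[i] :: (l.take i).reverse := by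
  cases i with
  | zero => simp only [List.take_zero, List.reverse_nil]; exact mm_push_nil _
  | succ j =>
    have hj : j < l.length := by omega
    have htj : l.take (j + 1) = l.take j ++ [l[j]] := by
      rw [List.take_add_one, List.getElem?_eq_getElem hj]; rfl
    have hlast : (l.take (j + 1)).getLast? = some l[j] := by
      rw [htj]; exact List.getLast?_concat
    have hti : l.take (j + 2) = l.take (j + 1) ++ [l[j + 1]] := by
      rw [List.take_add_one, List.getElem?_eq_getElem h]; rfl
    have hne : l[j] ≠ l[j + 1] := by
      have h2 := (List.isChain_append.mp (hti ▸ hch)).2.2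
      simpa [hlast] using h2
    rw [htj]
    rw [List.reverse_append, List.reverse_singleton, List.singleton_append]
    rw [mm_push_cons_ne _ _ _ hne]

-- Main invariant: from loop state (l, i), where the scanned prefix l.take (i+1) has no adjacent
-- equal pair, A's loop returns exactly B's stack result on l.
theorem mm_main : ∀ (l : List Int) (i : Nat), List.IsChain (· ≠ ·) (l.take (i + 1)) →
    mirror_merge_go l i = (l.foldl mm_push []).reverse := by
  intro l i
  induction l, i using mirror_merge_go.induct with
  | case1 l i h heq ih =>
    intro hch
    rw [mirror_merge_go, dif_pos h, if_pos heq]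
    rw [ih (isChain_take_one _)]
    congr 1
    -- foldl over the merged list equals foldl over l
    have hi : i < l.length := by omega
    have hi1 : i + 1 < l.length := h
    have hvi : l.getD i 0 = l[i] := List.getD_eq_getElem l 0 hi
    have hvi1 : l.getD (i + 1) 0 = l[i + 1] := List.getD_eq_getElem l 0 hi1
    have hlen : (l.take i).length = i := by simp; omega
    -- decompositions
    have hx : l[i + 1] = l[i] := by rw [← hvi1, ← heq, hvi]
    have hdecomp : l = l.take i ++ l[i] :: l[i] :: l.drop (i + 2) := by
      conv_lhs => rw [← List.take_append_drop i l]
      rw [List.drop_eq_getElem_cons hi, List.drop_eq_getElem_cons hi1, hx]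
    have hset : l.set i (l.getD i 0 + 1) = l.take i ++ (l[i] + 1) :: l.drop (i + 1) := by
      rw [List.set_eq_take_append_cons_drop, if_pos hi, hvi]
    have hmerged : (l.set i (l.getD i 0 + 1)).eraseIdx (i + 1)
        = l.take i ++ (l[i] + 1) :: l.drop (i + 2) := by
      rw [hset, List.eraseIdx_append_of_length_le (by omega)]
      congr 1
      have h1 : i + 1 - (l.take i).length = 1 := by omega
      rw [h1, List.eraseIdx_cons_succ, List.eraseIdx_zero, List.tail_drop]
    have hchp : List.IsChain (· ≠ ·) (l.take i) := by
      have : l.take (i + 1) = l.take i ++ l[i]?.toList := List.take_add_one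
      exact ((List.isChain_append.mp (this ▸ hch)).1)
    have hfoldp : (l.take i).foldl mm_push [] = (l.take i).reverse := by
      simpa using mm_push_fold_noadj (l.take i) [] (by simpa using hchp)
    have hpush1 : mm_push ((l.take i).reverse) (l[i]) = l[i] :: (l.take i).reverse :=
      mm_push_reverse_take l i hi hch
    calc ((l.set i (l.getD i 0 + 1)).eraseIdx (i + 1)).foldl mm_push []
        = (l.drop (i + 2)).foldl mm_push (mm_push ((l.take i).reverse) (l[i] + 1)) := by
          rw [hmerged]; simp [List.foldl_append, hfoldp]
      _ = l.foldl mm_push [] := by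
          conv_rhs => rw [hdecomp]
          simp only [List.foldl_append, hfoldp, List.foldl_cons]
          rw [hpush1, mm_push_cons_eq _ _ _ rfl]
  | case2 l i h hne ih =>
    intro hch
    rw [mirror_merge_go, dif_pos h, if_neg hne]
    apply ih
    -- extend the no-adjacent-equal prefix by one element
    have hi : i < l.length := by omega
    have hti : l.take (i + 2) = l.take (i + 1) ++ [l[i + 1]] := by
      rw [List.take_add_one, List.getElem?_eq_getElem h]; rfl
    rw [hti, List.isChain_append]
    refine ⟨hch, by simp, ?_⟩
    intro x hx y hy
    simp at hy
    subst hy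
    cases i with
    | zero =>
      have : l.take 1 = [l[0]] := by
        cases l with
        | nil => simp at hi
        | cons a t => simp
      rw [this] at hx
      simp at hx
      subst hx
      intro hc
      exact hne (by rw [List.getD_eq_getElem l 0 hi, List.getD_eq_getElem l 0 h, hc])
    | succ j =>
      have hj1 : j + 1 < l.length := hi
      have : l.take (j + 2) = l.take (j + 1) ++ [l[j + 1]] := by
        rw [List.take_add_one, List.getElem?_eq_getElem hj1]; rfl
      rw [this, List.getLast?_concat] at hx
      simp at hx
      subst hx
      intro hc
      exact hne (by rw [List.getD_eq_getElem l 0 hi, List.getD_eq_getElem l 0 h, hc])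
  | case3 l i h =>
    intro hch
    rw [mirror_merge_go, dif_neg h]
    have hl : l.take (i + 1) = l := List.take_of_length_le (by omega)
    rw [hl] at hch
    have := mm_push_fold_noadj l [] (by simpa using hch)
    simp [this]

-- ===== VERDICT (by name: the statement is the Claim_ definition above) =====
theorem mirror_merge_spec : Claim_equal_mirror_merge := by
  intro nums _
  unfold Spec_mirror_merge mirror_merge mirror_merge_alt
  exact mm_main nums 0 (isChain_take_one nums)
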